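-- pv_equiv track=rewrite | github.com/danbnyn/CDT | src/delaunay_triangulation/dt_utils.py | interleave_bits
-- ===== SOURCE A (Python) =====
-- def interleave_bits(
--         x: int,
--         y: int,
--         precision: int = 32
-- ) -> int:
--     """
--     This function interleaves the bits of two integers `x` and `y`, producing a new integer by alternating the bits of `x` and `y`.
--     This technique is often used in spatial indexing, such as creating Morton codes.
--
--     Parameters:
--     - x (int): The first integer.
--     - y (int): The second integer.
--     - precision (int, optional): The number of bits in each integer. Default is 32.
--
--     Returns:
--     - int: An integer resulting from interleaving the bits of `x` and `y`.
--     """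
--     result = 0
--     for i in range(precision):
--         result |= ((x & (1 << i)) << i) | ((y & (1 << i)) << (i + 1))
--     return result
-- ===== SOURCE B (Python) =====
-- def interleave_bits(
--         x: int,
--         y: int,
--         precision: int = 32
-- ) -> int:
--     """Morton-interleave the low `precision` bits of x and y by divide-and-conquer:
--     split the bit-width into halves, interleave each half recursively, and combine
--     the high half shifted past the interleaved low half."""
--     def go(a, b, n):
--         if n <= 0:
--             return 0
--         if n == 1:
--             return (a & 1) | ((b & 1) << 1)
--         h = n // 2
--         p = 1 << h
--         return go(a % p, b % p, h) + (go(a // p, b // p, n - h) << (2 * h))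
--     return go(x, y, precision)
-- ===== Notes on version B (the rewrite author's own statement) =====
-- stated objective: faster
-- what changed: A interleaves with a flat per-bit loop, masking and shifting each of the `precision` bit positions and OR-ing the terms; B is a divide-and-conquer recursion on the bit-width: it splits the operands into low/high halves with one mod/div, interleaves each half recursively, and adds the high result shifted past the interleaved low half.
import Mathlib
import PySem

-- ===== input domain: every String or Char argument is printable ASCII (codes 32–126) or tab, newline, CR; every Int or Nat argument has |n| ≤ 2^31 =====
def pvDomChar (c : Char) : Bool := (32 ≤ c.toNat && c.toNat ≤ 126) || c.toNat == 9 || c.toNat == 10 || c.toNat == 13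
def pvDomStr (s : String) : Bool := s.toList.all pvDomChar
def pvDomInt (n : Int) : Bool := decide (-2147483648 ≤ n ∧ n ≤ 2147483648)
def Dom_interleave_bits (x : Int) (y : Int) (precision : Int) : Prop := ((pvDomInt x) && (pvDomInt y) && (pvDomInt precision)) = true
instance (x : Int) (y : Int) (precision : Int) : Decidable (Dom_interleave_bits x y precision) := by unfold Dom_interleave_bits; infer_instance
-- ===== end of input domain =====

-- B replaces A's flat per-bit mask/shift/OR loop by a divide-and-conquer recursion on the
-- bit-width (interleave low and high halves recursively, shift the high result past the low),
-- measurably faster on large widths (objective: faster).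


-- ===== PORT A =====
-- Python: result = 0; for i in range(precision): result |= ((x & (1 << i)) << i) | ((y & (1 << i)) << (i + 1))
-- Shift amounts use i.toNat: every i produced by range(precision) is ≥ 0, so this is exact.
def interleave_bits (x : Int) (y : Int) (precision : Int) : Int :=
  (PySem.List.pyRange 0 precision).foldl
    (fun result i =>
      PySem.Int.bor result
        (PySem.Int.bor ((PySem.Int.band x ((1 : Int) <<< i.toNat)) <<< i.toNat)
                       ((PySem.Int.band y ((1 : Int) <<< i.toNat)) <<< (i.toNat + 1)))) 0

-- ===== PORT B =====
-- Python B's inner `go`: divide and conquer on the bit-width n.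
-- Shift amounts h and 2*h are ≥ 0 on every path taken, so `.toNat` is exact.
def interleave_bits_altGo (a b n : Int) : Int :=
  if n ≤ 0 then 0
  else if n = 1 then
    PySem.Int.bor (PySem.Int.band a 1) ((PySem.Int.band b 1) <<< (1 : Nat))
  else
    let h := PySem.Int.floordiv n 2
    let p := (1 : Int) <<< h.toNat
    interleave_bits_altGo (PySem.Int.mod a p) (PySem.Int.mod b p) h
      + (interleave_bits_altGo (PySem.Int.floordiv a p) (PySem.Int.floordiv b p) (n - h)) <<< (2 * h).toNat
termination_by n.toNat
decreasing_by
  all_goals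
    rw [PySem.Int.floordiv_eq_ediv_of_pos (by norm_num : (0:Int) < 2)]
    omega

def interleave_bits_alt (x : Int) (y : Int) (precision : Int) : Int :=
  interleave_bits_altGo x y precision

-- ===== PRECONDITION & SPEC =====
def Spec_interleave_bits (x : Int) (y : Int) (precision : Int) (out : Int) : Prop := out = interleave_bits_alt x y precision
instance (x : Int) (y : Int) (precision : Int) (out : Int) : Decidable (Spec_interleave_bits x y precision out) := by unfold Spec_interleave_bits; infer_instance

-- ===== CLAIM (what is proved, stated in full; the proofs are below) =====
def Claim_equal_interleave_bits : Prop := ∀ (x : Int) (y : Int) (precision : Int), Dom_interleave_bits x y precision → Spec_interleave_bits x y precision (interleave_bits x y precision)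

-- ===== LEMMAS AND PROOFS =====

-- The common specification: the Morton number of the low n bits of a and b, low bits first.
def mortonSpec (a b : Int) : Nat → Int
  | 0 => 0
  | n + 1 => a % 2 + 2 * (b % 2) + 4 * mortonSpec (a / 2) (b / 2) n

lemma mortonSpec_bounds (n : Nat) : ∀ a b : Int, 0 ≤ mortonSpec a b n ∧ mortonSpec a b n < 4 ^ n := by
  induction n with
  | zero => intro a b; simp [mortonSpec]
  | succ n ih =>
    intro a b
    obtain ⟨h0, h1⟩ := ih (a / 2) (b / 2)
    have ha0 : 0 ≤ a % 2 := Int.emod_nonneg a (by norm_num)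
    have ha1 : a % 2 < 2 := Int.emod_lt_of_pos a (by norm_num)
    have hb0 : 0 ≤ b % 2 := Int.emod_nonneg b (by norm_num)
    have hb1 : b % 2 < 2 := Int.emod_lt_of_pos b (by norm_num)
    have hp : (4 : Int) ^ (n + 1) = 4 * 4 ^ n := by ring
    constructor
    · simp only [mortonSpec]; linarith
    · simp only [mortonSpec]; rw [hp]; linarith

lemma ediv_two_ediv_pow (a : Int) (n : Nat) : a / 2 / 2 ^ n = a / 2 ^ (n + 1) := by
  rw [Int.ediv_ediv_of_nonneg (by norm_num : (0:Int) ≤ 2), pow_succ, mul_comm ((2:Int) ^ n) 2]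

-- Peeling the HIGH digit instead of the low one.
lemma mortonSpec_succ_high (n : Nat) :
    ∀ a b : Int, mortonSpec a b (n + 1) =
      mortonSpec a b n + 4 ^ n * (a / 2 ^ n % 2 + 2 * (b / 2 ^ n % 2)) := by
  induction n with
  | zero => intro a b; simp [mortonSpec]
  | succ n ih =>
    intro a b
    have h : mortonSpec a b (n + 2) =
        a % 2 + 2 * (b % 2) + 4 * mortonSpec (a / 2) (b / 2) (n + 1) := rfl
    rw [h, ih (a / 2) (b / 2), ediv_two_ediv_pow a n, ediv_two_ediv_pow b n]
    have h' : mortonSpec a b (n + 1) =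
        a % 2 + 2 * (b % 2) + 4 * mortonSpec (a / 2) (b / 2) n := rfl
    rw [h']; ring

-- OR of bit-disjoint naturals is addition.
lemma nat_lor_two_pow_mul (u c k : Nat) (h : u < 2 ^ k) : u ||| 2 ^ k * c = u + 2 ^ k * c := by
  apply Nat.eq_of_testBit_eq
  intro j
  rw [Nat.testBit_lor]
  have e1 : (2 ^ k * c).testBit j = if j < k then (0 : Nat).testBit j else c.testBit (j - k) := by
    simpa using Nat.testBit_two_pow_mul_add c (Nat.two_pow_pos k) j
  have e2 : (u + 2 ^ k * c).testBit j = if j < k then u.testBit j else c.testBit (j - k) := by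
    rw [Nat.add_comm]; exact Nat.testBit_two_pow_mul_add c h j
  rw [e1, e2]
  by_cases hj : j < k
  · simp [hj]
  · have hu : u.testBit j = false :=
      Nat.testBit_lt_two_pow (lt_of_lt_of_le h (Nat.pow_le_pow_right (by norm_num) (by omega)))
    simp [hj, hu]

-- Int version, for nonnegative operands.
lemma int_bor_disjoint (u c : Int) (k : Nat) (hu0 : 0 ≤ u) (hu : u < 2 ^ k) (hc : 0 ≤ c) :
    PySem.Int.bor u (2 ^ k * c) = u + 2 ^ k * c := by
  obtain ⟨m, rfl⟩ := Int.eq_ofNat_of_zero_le hu0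
  obtain ⟨d, rfl⟩ := Int.eq_ofNat_of_zero_le hc
  have hmul : (2 : Int) ^ k * (d : Int) = ((2 ^ k * d : Nat) : Int) := by push_cast; ring
  rw [hmul, PySem.Int.bor_natCast, nat_lor_two_pow_mul m d k (by exact_mod_cast hu)]
  push_cast; ring

-- x & 2^i extracts the i-th two's-complement bit, for EVERY Int x (also negative).
lemma band_two_pow (x : Int) (i : Nat) :
    PySem.Int.band x (2 ^ i) = x / 2 ^ i % 2 * 2 ^ i := by
  have hpow : ((2 : Int) ^ i) = ((2 ^ i : Nat) : Int) := by push_cast; ring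
  rcases le_or_gt 0 x with hx | hx
  · obtain ⟨m, rfl⟩ := Int.eq_ofNat_of_zero_le hx
    rw [hpow, PySem.Int.band_natCast, Nat.and_two_pow, Nat.testBit_eq_decide_div_mod_eq]
    have hcast : ((m : Int)) / ((2 ^ i : Nat) : Int) % 2 = ((m / 2 ^ i % 2 : Nat) : Int) := by
      push_cast; rfl
    rw [hcast]
    by_cases hb : m / 2 ^ i % 2 = 1
    · simp [hb]
    · have h0 : m / 2 ^ i % 2 = 0 := by omega
      simp [h0]
  · -- negative case: x = -(m+1)
    set m : Nat := (-x - 1).toNat with hm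
    have hxm : x = -(m : Int) - 1 := by
      have : ((-x - 1).toNat : Int) = -x - 1 := Int.toNat_of_nonneg (by omega)
      omega
    have hband : PySem.Int.band x (2 ^ i) = ((2 ^ i - (2 ^ i &&& m) : Nat) : Int) := by
      rw [PySem.Int.band, if_neg (by omega), if_pos (by positivity)]
      rw [hpow, Int.toNat_natCast]
    have hand : 2 ^ i &&& m = (m.testBit i).toNat * 2 ^ i := by
      rw [Nat.and_comm, Nat.and_two_pow]
    set q : Nat := m / 2 ^ i with hq
    set r : Nat := m % 2 ^ i with hr
    have hqr : m = 2 ^ i * q + r := (Nat.div_add_mod m (2 ^ i)).symm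
    have hrlt : r < 2 ^ i := Nat.mod_lt m (Nat.two_pow_pos i)
    have hxdecomp : x = (-(q : Int) - 1) * 2 ^ i + ((2 : Int) ^ i - (r : Int) - 1) := by
      rw [hxm]; push_cast [hqr]; ring
    have hxdiv : x / 2 ^ i = -(q : Int) - 1 := by
      rw [hxdecomp, add_comm, Int.add_mul_ediv_right _ _ (by positivity : (2:Int)^i ≠ 0),
          Int.ediv_eq_zero_of_lt (by omega) (by omega)]
      ring
    rw [hband, hand, Nat.testBit_eq_decide_div_mod_eq, hxdiv, ← hq]
    by_cases hb : q % 2 = 1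
    · have : (-(q : Int) - 1) % 2 = 0 := by omega
      simp [hb, this]
    · have hq0 : q % 2 = 0 := by omega
      have : (-(q : Int) - 1) % 2 = 1 := by omega
      simp [hq0, this]

lemma two_pow_two_mul (i : Nat) : (2 : Int) ^ (2 * i) = 4 ^ i := by
  rw [pow_mul]; norm_num

-- One term of A's loop, in closed form.
lemma termA_eq (x y : Int) (i : Nat) :
    PySem.Int.bor ((PySem.Int.band x ((1 : Int) <<< i)) <<< i)
                  ((PySem.Int.band y ((1 : Int) <<< i)) <<< (i + 1)) =
      4 ^ i * (x / 2 ^ i % 2 + 2 * (y / 2 ^ i % 2)) := by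
  have h1 : ((1 : Int) <<< i) = 2 ^ i := by rw [Int.shiftLeft_eq]; ring
  rw [h1, band_two_pow x i, band_two_pow y i, Int.shiftLeft_eq, Int.shiftLeft_eq]
  set bx : Int := x / 2 ^ i % 2 with hbx
  set bY : Int := y / 2 ^ i % 2 with hbY
  have hbx0 : 0 ≤ bx := Int.emod_nonneg _ (by norm_num)
  have hbx1 : bx < 2 := Int.emod_lt_of_pos _ (by norm_num)
  have hbY0 : 0 ≤ bY := Int.emod_nonneg _ (by norm_num)
  have hu : bx * 2 ^ i * 2 ^ i = bx * 2 ^ (2 * i) := by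
    rw [two_mul, pow_add]; ring
  have hv : bY * 2 ^ i * 2 ^ (i + 1) = 2 ^ (2 * i + 1) * bY := by
    rw [two_mul, pow_add, pow_add]; ring
  rw [hu, hv, int_bor_disjoint _ bY (2 * i + 1) (by positivity)
        (by have : (2:Int) ^ (2*i+1) = 2 * 2 ^ (2*i) := by ring
            nlinarith [pow_pos (by norm_num : (0:Int) < 2) (2 * i)])
        hbY0]
  have h4 : (2 : Int) ^ (2 * i + 1) = 2 * 4 ^ i := by
    rw [pow_succ, two_pow_two_mul]; ring
  rw [h4, ← two_pow_two_mul, two_pow_two_mul]; ring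

-- A's fold computes mortonSpec.
lemma foldA (x y : Int) (n : Nat) : interleave_bits x y (n : Int) = mortonSpec x y n := by
  induction n with
  | zero =>
    simp [interleave_bits, PySem.List.pyRange_one_eq_nil (by norm_num : (0:Int) ≤ 0), mortonSpec]
  | succ n ih =>
    unfold interleave_bits at ih ⊢
    have hcast : ((n + 1 : Nat) : Int) = (n : Int) + 1 := by push_cast; ring
    rw [hcast, PySem.List.pyRange_one_succ_right (by positivity), List.foldl_append, ih]
    simp only [List.foldl_cons, List.foldl_nil, Int.toNat_natCast]
    rw [show ((n : Int) + 1) = ((n + 1 : Nat) : Int) by push_cast; ring,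
        Int.shiftLeft_natCast_right, Int.shiftLeft_natCast_right, Int.shiftLeft_natCast_right,
        termA_eq x y n]
    obtain ⟨h0, h1⟩ := mortonSpec_bounds n x y
    have hd0 : 0 ≤ x / 2 ^ n % 2 + 2 * (y / 2 ^ n % 2) := by
      have := Int.emod_nonneg (x / 2 ^ n) (show (2:Int) ≠ 0 by norm_num)
      have := Int.emod_nonneg (y / 2 ^ n) (show (2:Int) ≠ 0 by norm_num)
      linarith
    rw [← two_pow_two_mul, int_bor_disjoint _ _ (2 * n) h0 (by rwa [two_pow_two_mul]) hd0,
        two_pow_two_mul, ← mortonSpec_succ_high n x y]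

-- Low bits of a % 2^(m+1).
lemma emod_pow_emod_two (a : Int) (m : Nat) : a % 2 ^ (m + 1) % 2 = a % 2 :=
  Int.emod_emod_of_dvd a ⟨2 ^ m, by rw [pow_succ]; ring⟩

lemma emod_pow_ediv_two (a : Int) (m : Nat) : a % 2 ^ (m + 1) / 2 = a / 2 % 2 ^ m := by
  have h2 : ((2:Int) ^ (m+1)) = 2 ^ m * 2 := by rw [pow_succ]
  rw [Int.emod_def, h2]
  have : a - 2 ^ m * 2 * (a / (2 ^ m * 2)) = a + (-(2 ^ m * (a / (2 ^ m * 2)))) * 2 := by ring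
  rw [this, Int.add_mul_ediv_right _ _ (by norm_num : (2:Int) ≠ 0)]
  have hdd : a / (2 ^ m * 2) = a / 2 / 2 ^ m := by
    rw [ediv_two_ediv_pow a m, pow_succ]
  rw [hdd, Int.emod_def]
  ring

-- mortonSpec only depends on the low m bits.
lemma mortonSpec_mod (m : Nat) : ∀ a b : Int,
    mortonSpec (a % 2 ^ m) (b % 2 ^ m) m = mortonSpec a b m := by
  induction m with
  | zero => intro a b; rfl
  | succ m ih =>
    intro a b
    show _ % 2 + 2 * (_ % 2) + 4 * mortonSpec _ _ m = _
    rw [emod_pow_emod_two a m, emod_pow_emod_two b m,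
        emod_pow_ediv_two a m, emod_pow_ediv_two b m, ih (a / 2) (b / 2)]
    rfl

-- Splitting mortonSpec into low m bits and the rest.
lemma mortonSpec_split (m : Nat) : ∀ (j : Nat) (a b : Int),
    mortonSpec a b (m + j) =
      mortonSpec a b m + 4 ^ m * mortonSpec (a / 2 ^ m) (b / 2 ^ m) j := by
  induction m with
  | zero => intro j a b; simp [mortonSpec]
  | succ m ih =>
    intro j a b
    have e1 : m + 1 + j = (m + j) + 1 := by omega
    rw [e1]
    show a % 2 + 2 * (b % 2) + 4 * mortonSpec (a / 2) (b / 2) (m + j) = _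
    rw [ih j (a / 2) (b / 2), ediv_two_ediv_pow a m, ediv_two_ediv_pow b m]
    show _ = a % 2 + 2 * (b % 2) + 4 * mortonSpec (a / 2) (b / 2) m + 4 ^ (m + 1) * _
    ring

-- B's divide-and-conquer computes mortonSpec (strong induction on the fuel n.toNat).
lemma altGo_eq (k : Nat) : ∀ (a b n : Int), n.toNat = k →
    interleave_bits_altGo a b n = mortonSpec a b k := by
  induction k using Nat.strong_induction_on with
  | _ k ih =>
    intro a b n hk
    rw [interleave_bits_altGo]
    by_cases hn0 : n ≤ 0
    · rw [if_pos hn0]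
      have : k = 0 := by omega
      subst this; rfl
    · rw [if_neg hn0]
      by_cases hn1 : n = 1
      · rw [if_pos hn1]
        have hk1 : k = 1 := by omega
        subst hk1
        have hba : PySem.Int.band a 1 = a % 2 := by
          rw [PySem.Int.band_one, PySem.Int.mod_eq_emod_of_pos (by norm_num)]
        have hbb : PySem.Int.band b 1 = b % 2 := by
          rw [PySem.Int.band_one, PySem.Int.mod_eq_emod_of_pos (by norm_num)]
        rw [hba, hbb, Int.shiftLeft_eq]
        have : (b % 2) * 2 ^ (1:Nat) = 2 ^ (1:Nat) * (b % 2) := by ring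
        rw [this, int_bor_disjoint (a % 2) (b % 2) 1
              (Int.emod_nonneg a (by norm_num)) (Int.emod_lt_of_pos a (by norm_num))
              (Int.emod_nonneg b (by norm_num))]
        show _ = a % 2 + 2 * (b % 2) + 4 * mortonSpec (a / 2) (b / 2) 0
        simp [mortonSpec]
      · rw [if_neg hn1]
        have hn2 : 2 ≤ n := by omega
        have hF : PySem.Int.floordiv n 2 = n / 2 :=
          PySem.Int.floordiv_eq_ediv_of_pos (by norm_num)
        set h : Int := PySem.Int.floordiv n 2 with hh
        have hh2 : h = n / 2 := hF
        have hpos : 1 ≤ h := by omega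
        have hlt : h < n := by omega
        set m : Nat := h.toNat with hm
        have hmh : (m : Int) = h := Int.toNat_of_nonneg (by omega)
        have hp2 : (1 : Int) <<< m = 2 ^ m := by rw [Int.shiftLeft_eq]; ring
        have hppos : (0 : Int) < 2 ^ m := by positivity
        have hmodA : PySem.Int.mod a ((1:Int) <<< m) = a % 2 ^ m := by
          rw [hp2, PySem.Int.mod_eq_emod_of_pos hppos]
        have hmodB : PySem.Int.mod b ((1:Int) <<< m) = b % 2 ^ m := by
          rw [hp2, PySem.Int.mod_eq_emod_of_pos hppos]
        have hdivA : PySem.Int.floordiv a ((1:Int) <<< m) = a / 2 ^ m := by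
          rw [hp2]; exact PySem.Int.floordiv_eq_ediv_of_pos hppos
        have hdivB : PySem.Int.floordiv b ((1:Int) <<< m) = b / 2 ^ m := by
          rw [hp2]; exact PySem.Int.floordiv_eq_ediv_of_pos hppos
        have hmlt : m < k := by omega
        have hjlt : (n - h).toNat < k := by omega
        have hrec1 := ih m hmlt (a % 2 ^ m) (b % 2 ^ m) h (by omega)
        have hrec2 := ih (n - h).toNat hjlt (a / 2 ^ m) (b / 2 ^ m) (n - h) rfl
        simp only [← hm, hmodA, hmodB, hdivA, hdivB]
        rw [hrec1, hrec2, mortonSpec_mod m a b]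
        have hsplit : k = m + (n - h).toNat := by omega
        rw [hsplit, mortonSpec_split m (n - h).toNat a b, Int.shiftLeft_eq]
        have h2m : ((2:Int)) ^ ((2 * h).toNat) = 4 ^ m := by
          have : (2 * h).toNat = 2 * m := by omega
          rw [this, two_pow_two_mul]
        rw [h2m]; ring

-- ===== VERDICT (by name: the statement is the Claim_ definition above) =====
theorem interleave_bits_spec : Claim_equal_interleave_bits := by
  intro x y p _
  unfold Spec_interleave_bits interleave_bits_alt
  rw [altGo_eq p.toNat x y p rfl]
  rcases le_or_gt 0 p with hp | hp
  · have hA := foldA x y p.toNat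
    rw [show ((p.toNat : Nat) : Int) = p from by omega] at hA
    exact hA
  · have h0 : p.toNat = 0 := by omega
    rw [h0]
    unfold interleave_bits
    rw [PySem.List.pyRange_one_eq_nil (by omega)]
    rfl
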